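-- pv_equiv track=rewrite | github.com/kinghyeongu/LEARN_PYTHON | 15_OX퀴즈.py | solution
-- ===== SOURCE A (Python) =====
-- def solution(result):
--     score=0
--     count=0
--     for i in result:
--         if i=='O':
--             count+=1
--             score+=count
--         elif i=='X':
--             count=0
--     return score
-- ===== SOURCE B (Python) =====
-- def solution(result):
--     total = 0
--     run = 0
--     for ch in result:
--         if ch == 'O':
--             run += 1
--         elif ch == 'X':
--             total += run * (run + 1) // 2
--             run = 0
--     return total + run * (run + 1) // 2
-- ===== Notes on version B (the rewrite author's own statement) =====
-- stated objective: alternative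
-- what changed: Instead of adding the running count to the score at every scoring character, B only tracks the length of the current scoring run and adds the closed-form triangular number run*(run+1)//2 whenever the run is broken or the input ends.
import Mathlib
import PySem

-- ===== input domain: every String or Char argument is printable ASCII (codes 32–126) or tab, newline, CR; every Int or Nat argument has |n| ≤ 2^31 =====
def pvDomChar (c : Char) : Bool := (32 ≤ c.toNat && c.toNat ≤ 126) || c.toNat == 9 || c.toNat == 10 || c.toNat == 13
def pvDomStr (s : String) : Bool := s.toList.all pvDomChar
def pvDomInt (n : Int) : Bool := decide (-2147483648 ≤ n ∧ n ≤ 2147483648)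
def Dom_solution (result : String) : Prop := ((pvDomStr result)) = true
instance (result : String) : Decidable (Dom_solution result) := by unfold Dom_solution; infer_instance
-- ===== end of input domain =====

-- B replaces A's per-'O' score increment by tracking only the current O-run length and
-- adding the closed-form triangular number run*(run+1)//2 when a run ends ('X' or end of input).

-- ===== PORT A =====
-- A: for i in result: if 'O' then count += 1; score += count, elif 'X' then count = 0
def solution (result : String) : Int :=
  (result.toList.foldl
    (fun (st : Int × Int) i =>
      if i = 'O' then (st.1 + (st.2 + 1), st.2 + 1)
      else if i = 'X' then (st.1, 0)
      else st)
    (0, 0)).1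

-- ===== PORT B =====
-- B: for ch in result: if 'O' then run += 1, elif 'X' then total += run*(run+1)//2; run = 0
--    return total + run*(run+1)//2
def solution_alt (result : String) : Int :=
  let st := result.toList.foldl
    (fun (st : Int × Int) ch =>
      if ch = 'O' then (st.1, st.2 + 1)
      else if ch = 'X' then (st.1 + PySem.Int.floordiv (st.2 * (st.2 + 1)) 2, 0)
      else st)
    (0, 0)
  st.1 + PySem.Int.floordiv (st.2 * (st.2 + 1)) 2

-- ===== PRECONDITION & SPEC =====
def Spec_solution (result : String) (out : Int) : Prop := out = solution_alt result
instance (result : String) (out : Int) : Decidable (Spec_solution result out) := by unfold Spec_solution; infer_instance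

-- ===== CLAIM (what is proved, stated in full; the proofs are below) =====
def Claim_equal_solution : Prop := ∀ (result : String), Dom_solution result → Spec_solution result (solution result)

-- ===== LEMMAS AND PROOFS =====

-- triangular-number helper: tri c = c*(c+1)//2
def pvTri (c : Int) : Int := PySem.Int.floordiv (c * (c + 1)) 2

theorem pvTri_succ (c : Int) : pvTri (c + 1) = pvTri c + (c + 1) := by
  unfold pvTri
  rw [PySem.Int.floordiv_eq_ediv_of_pos (by omega), PySem.Int.floordiv_eq_ediv_of_pos (by omega)]
  have h : (c + 1) * (c + 1 + 1) = c * (c + 1) + (c + 1) * 2 := by ring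
  rw [h, Int.add_mul_ediv_right _ _ (by omega)]

theorem pvTri_zero : pvTri 0 = 0 := by decide

-- loop invariant: A's score = B's total + tri (current run), and both loops keep the same run
theorem pv_invariant (l : List Char) (t c : Int) :
    l.foldl
      (fun (st : Int × Int) i =>
        if i = 'O' then (st.1 + (st.2 + 1), st.2 + 1)
        else if i = 'X' then (st.1, 0)
        else st)
      (t + pvTri c, c)
    = (let b := l.foldl
        (fun (st : Int × Int) ch =>
          if ch = 'O' then (st.1, st.2 + 1)
          else if ch = 'X' then (st.1 + PySem.Int.floordiv (st.2 * (st.2 + 1)) 2, 0)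
          else st)
        (t, c);
       (b.1 + pvTri b.2, b.2)) := by
  induction l generalizing t c with
  | nil => simp
  | cons x xs ih =>
    by_cases hO : x = 'O'
    · simp only [List.foldl_cons, hO]
      have : t + pvTri c + (c + 1) = t + pvTri (c + 1) := by rw [pvTri_succ]; ring
      rw [this]
      exact ih t (c + 1)
    · by_cases hX : x = 'X'
      · subst hX
        have h0 : t + pvTri c = (t + PySem.Int.floordiv (c * (c + 1)) 2) + pvTri 0 := by
          rw [pvTri_zero]; unfold pvTri; ring
        simp only [List.foldl_cons, Char.reduceEq, if_false, if_true]
        rw [h0]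
        exact ih _ 0
      · simp only [List.foldl_cons, if_neg hO, if_neg hX]
        exact ih t c

-- ===== VERDICT (by name: the statement is the Claim_ definition above) =====
theorem solution_spec : Claim_equal_solution := by
  intro result _
  unfold Spec_solution solution solution_alt
  have h := pv_invariant result.toList 0 0
  simp only [pvTri_zero, add_zero] at h
  rw [h]
  simp [pvTri]
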